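-- pv_equiv track=rewrite | github.com/sueszli/vector-database-benchmark | dataset/python-mutated/erroranalysis.py | error_list
-- ===== SOURCE A (Python) =====
-- def error_list(train_sents, test_sents):
--     if False:
--         while True:
--             i = 10
--     '\n    Returns a list of human-readable strings indicating the errors in the\n    given tagging of the corpus.\n\n    :param train_sents: The correct tagging of the corpus\n    :type train_sents: list(tuple)\n    :param test_sents: The tagged corpus\n    :type test_sents: list(tuple)\n    '
--     hdr = ('%25s | %s | %s\n' + '-' * 26 + '+' + '-' * 24 + '+' + '-' * 26) % ('left context', 'word/test->gold'.center(22), 'right context')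
--     errors = [hdr]
--     for (train_sent, test_sent) in zip(train_sents, test_sents):
--         for (wordnum, (word, train_pos)) in enumerate(train_sent):
--             test_pos = test_sent[wordnum][1]
--             if train_pos != test_pos:
--                 left = ' '.join(('%s/%s' % w for w in train_sent[:wordnum]))
--                 right = ' '.join(('%s/%s' % w for w in train_sent[wordnum + 1:]))
--                 mid = f'{word}/{test_pos}->{train_pos}'
--                 errors.append(f'{left[-25:]:>25} | {mid.center(22)} | {right[:25]}')
--     return errors
-- ===== SOURCE B (Python) =====
-- def error_list(train_sents, test_sents):
--     """
--     Returns a list of human-readable strings indicating the errors in the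
--     given tagging of the corpus.
--
--     Instead of re-joining the whole left/right context for every error
--     (quadratic per sentence), build running 25-char-truncated prefix and
--     suffix context joins once per sentence, then read them off per word.
--     """
--     hdr = ('%25s | %s | %s\n' + '-' * 26 + '+' + '-' * 24 + '+' + '-' * 26) % (
--         'left context', 'word/test->gold'.center(22), 'right context')
--     errors = [hdr]
--     for train_sent, test_sent in zip(train_sents, test_sents):
--         toks = ['%s/%s' % w for w in train_sent]
--         # pref[i] == (' '.join(toks[:i]))[-25:]
--         pref = ['']
--         for j, t in enumerate(toks):
--             pref.append(t[-25:] if j == 0 else (pref[j] + ' ' + t)[-25:])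
--         # after reversal, suf[i] == (' '.join(toks[i:]))[:25]
--         suf = ['']
--         for j, t in enumerate(reversed(toks)):
--             suf.append(t[:25] if j == 0 else (t + ' ' + suf[j])[:25])
--         suf.reverse()
--         for i, (word, gold) in enumerate(train_sent):
--             test = test_sent[i][1]
--             if gold != test:
--                 mid = f'{word}/{test}->{gold}'
--                 errors.append(f'{pref[i]:>25} | {mid.center(22)} | {suf[i + 1]}')
--     return errors
-- ===== Notes on version B (the rewrite author's own statement) =====
-- stated objective: faster
-- what changed: Instead of re-joining the entire left and right context from scratch for every mismatching word, B builds, once per sentence, running prefix/suffix context joins truncated to the 25 characters the output actually uses, and reads each error's contexts off those arrays.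
import Mathlib
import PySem

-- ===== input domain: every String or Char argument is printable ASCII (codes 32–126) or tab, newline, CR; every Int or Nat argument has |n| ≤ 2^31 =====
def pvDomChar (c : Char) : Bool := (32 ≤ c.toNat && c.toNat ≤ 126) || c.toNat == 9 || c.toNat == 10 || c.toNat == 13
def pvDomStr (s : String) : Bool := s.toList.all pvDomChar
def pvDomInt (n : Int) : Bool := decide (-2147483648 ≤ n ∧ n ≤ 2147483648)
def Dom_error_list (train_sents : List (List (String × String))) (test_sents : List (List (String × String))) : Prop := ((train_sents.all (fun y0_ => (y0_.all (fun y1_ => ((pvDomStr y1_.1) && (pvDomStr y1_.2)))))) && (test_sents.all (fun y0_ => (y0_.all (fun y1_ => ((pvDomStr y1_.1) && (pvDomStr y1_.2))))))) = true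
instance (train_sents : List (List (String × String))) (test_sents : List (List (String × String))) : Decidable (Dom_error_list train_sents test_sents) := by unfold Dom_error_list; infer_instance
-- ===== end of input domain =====

-- B replaces A's per-error full re-join of the left/right context by running prefix/suffix
-- context joins (truncated to the 25 characters the output uses) built once per sentence: faster.

-- ===== PORT A =====
-- shared formatting helpers (both Pythons compute these identically)
-- str.center(w): CPython pads with left = marg//2 + (marg & w & 1)
def pvCenter (cs : List Char) (w : Nat) : List Char :=
  if w ≤ cs.length then cs else
    let marg := w - cs.length
    let left := marg / 2 + (marg &&& w &&& 1)
    List.replicate left ' ' ++ cs ++ List.replicate (marg - left) ' '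

-- '%25s' / f'{s:>25}': right-justify, no truncation
def pvRjust (cs : List Char) (w : Nat) : List Char :=
  if w ≤ cs.length then cs else List.replicate (w - cs.length) ' ' ++ cs

-- '%s/%s' % w
def pvTok (p : String × String) : List Char := p.1.toList ++ '/' :: p.2.toList

-- the constant header line hdr
def pvHdr : String := String.ofList
  (pvRjust "left context".toList 25 ++ " | ".toList ++ pvCenter "word/test->gold".toList 22
    ++ " | right context\n".toList
    ++ List.replicate 26 '-' ++ '+' :: (List.replicate 24 '-' ++ '+' :: List.replicate 26 '-'))

def error_list (train_sents : List (List (String × String))) (test_sents : List (List (String × String))) : List String :=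
  (train_sents.zip test_sents).foldl (fun errors st =>
    (PySem.List.enumerate st.1).foldl (fun errors iw =>
      let wordnum := iw.1
      let word := iw.2.1
      let train_pos := iw.2.2
      let test_pos := ((PySem.List.pyGet? st.2 wordnum).getD ("", "")).2
      if train_pos ≠ test_pos then
        let left := PySem.Chars.join [' '] ((PySem.List.slice st.1 none (some wordnum)).map pvTok)
        let right := PySem.Chars.join [' '] ((PySem.List.slice st.1 (some (wordnum + 1)) none).map pvTok)
        let mid := word.toList ++ '/' :: test_pos.toList ++ '-' :: '>' :: train_pos.toList
        errors ++ [String.ofList (pvRjust (PySem.List.slice left (some (-25)) none) 25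
          ++ ' ' :: '|' :: ' ' :: (pvCenter mid 22 ++ ' ' :: '|' :: ' ' :: PySem.List.slice right none (some 25)))]
      else errors) errors) [pvHdr]

-- ===== PORT B =====
-- pref[j+1] == (' '.join(toks[:j+1]))[-25:], built incrementally (B's first inner loop)
def pvPref (toks : List (List Char)) : List (List Char) :=
  (PySem.List.enumerate toks).foldl (fun pref jt =>
    pref ++ [if jt.1 == 0 then PySem.List.slice jt.2 (some (-25)) none
             else PySem.List.slice (((PySem.List.pyGet? pref jt.1).getD []) ++ ' ' :: jt.2) (some (-25)) none]) [[]]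

-- after the final reverse, suf[i] == (' '.join(toks[i:]))[:25] (B's second inner loop)
def pvSuf (toks : List (List Char)) : List (List Char) :=
  ((PySem.List.enumerate toks.reverse).foldl (fun suf jt =>
    suf ++ [if jt.1 == 0 then PySem.List.slice jt.2 none (some 25)
            else PySem.List.slice (jt.2 ++ ' ' :: ((PySem.List.pyGet? suf jt.1).getD [])) none (some 25)]) [[]]).reverse

def error_list_alt (train_sents : List (List (String × String))) (test_sents : List (List (String × String))) : List String :=
  (train_sents.zip test_sents).foldl (fun errors st =>
    let toks := st.1.map pvTok
    let pref := pvPref toks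
    let suf := pvSuf toks
    (PySem.List.enumerate st.1).foldl (fun errors iw =>
      let i := iw.1
      let word := iw.2.1
      let gold := iw.2.2
      let test := ((PySem.List.pyGet? st.2 i).getD ("", "")).2
      if gold ≠ test then
        let mid := word.toList ++ '/' :: test.toList ++ '-' :: '>' :: gold.toList
        errors ++ [String.ofList (pvRjust ((PySem.List.pyGet? pref i).getD []) 25
          ++ ' ' :: '|' :: ' ' :: (pvCenter mid 22 ++ ' ' :: '|' :: ' ' :: (PySem.List.pyGet? suf (i + 1)).getD []))]
      else errors) errors) [pvHdr]

-- ===== PRECONDITION & SPEC =====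
-- A reads test_sent[wordnum] for every word of a zipped train_sent: it raises IndexError
-- when a test sentence is shorter than its train sentence; Pre_ excludes exactly that.
def Pre_error_list (train_sents : List (List (String × String))) (test_sents : List (List (String × String))) : Prop :=
  ∀ p ∈ train_sents.zip test_sents, p.1.length ≤ p.2.length
instance (train_sents : List (List (String × String))) (test_sents : List (List (String × String))) : Decidable (Pre_error_list train_sents test_sents) := by unfold Pre_error_list; infer_instance

def pvWitness_error_list : (List (List (String × String))) × (List (List (String × String))) :=
  ([[("a", "X"), ("b", "Y")]], [[("a", "Z"), ("b", "Y")]])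

def Spec_error_list (train_sents : List (List (String × String))) (test_sents : List (List (String × String))) (out : List String) : Prop := out = error_list_alt train_sents test_sents
instance (train_sents : List (List (String × String))) (test_sents : List (List (String × String))) (out : List String) : Decidable (Spec_error_list train_sents test_sents out) := by unfold Spec_error_list; infer_instance

-- ===== CLAIM (what is proved, stated in full; the proofs are below) =====
def Claim_equal_error_list : Prop := ∀ (train_sents : List (List (String × String))) (test_sents : List (List (String × String))), Dom_error_list train_sents test_sents → Pre_error_list train_sents test_sents → Spec_error_list train_sents test_sents (error_list train_sents test_sents)

-- ===== LEMMAS AND PROOFS =====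

def pvT25 (cs : List Char) : List Char := cs.take 25

def pvL25 (cs : List Char) : List Char := cs.drop (cs.length - 25)

def pvJoin (ts : List (List Char)) : List Char := PySem.Chars.join [' '] ts

lemma pvT25_append (a b : List Char) : pvT25 (a ++ b) = pvT25 (a ++ pvT25 b) := by
  simp only [pvT25, List.take_append, List.take_take]
  congr 2
  omega

lemma pvL25_eq_rev (cs : List Char) : pvL25 cs = (cs.reverse.take 25).reverse := by
  rw [List.take_reverse, List.reverse_reverse, pvL25]

lemma pvL25_append (a b : List Char) : pvL25 (a ++ b) = pvL25 (pvL25 a ++ b) := by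
  rw [pvL25_eq_rev (a ++ b), pvL25_eq_rev (pvL25 a ++ b), List.reverse_append, List.reverse_append,
    pvL25_eq_rev a, List.reverse_reverse, ← pvT25, ← pvT25, ← pvT25, pvT25_append]

lemma pvJoin_snoc (ts : List (List Char)) (t : List Char) (h : ts ≠ []) :
    pvJoin (ts ++ [t]) = pvJoin ts ++ ' ' :: t := by
  induction ts with
  | nil => simp at h
  | cons p rest ih =>
    cases rest with
    | nil => simp [pvJoin, PySem.Chars.join_cons_cons, PySem.Chars.join_singleton]
    | cons q r =>
      simp only [List.cons_append, pvJoin, PySem.Chars.join_cons_cons] at *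
      rw [ih (by simp)]
      simp

lemma pvJoin_cons (t : List Char) (ts : List (List Char)) (h : ts ≠ []) :
    pvJoin (t :: ts) = t ++ ' ' :: pvJoin ts := by
  cases ts with
  | nil => simp at h
  | cons q r => simp [pvJoin, PySem.Chars.join_cons_cons]

lemma slice_neg25 (cs : List Char) : PySem.List.slice cs (some (-25)) none = pvL25 cs := by
  rw [PySem.List.slice_from_neg_ofNat cs 25 (by omega), pvL25]

lemma slice_to25 (cs : List Char) : PySem.List.slice cs none (some 25) = pvT25 cs := by
  rw [PySem.List.slice_to cs (by norm_num)]
  rfl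

lemma pyGetD_map_range (n : Nat) (f : Nat → List Char) (i : Nat) (h : i < n) :
    (PySem.List.pyGet? ((List.range n).map f) (i : Int)).getD [] = f i := by
  rw [PySem.List.pyGet?_natCast, List.getElem?_eq_getElem (by simpa using h)]
  simp

lemma pvPref_spec (toks : List (List Char)) :
    pvPref toks = (List.range (toks.length + 1)).map (fun i => pvL25 (pvJoin (toks.take i))) := by
  induction toks using List.reverseRecOn with
  | nil => simp [pvPref, PySem.List.enumerate, pvJoin, pvL25, PySem.Chars.join_nil]
  | append_singleton ts t ih =>
    rw [pvPref, PySem.List.enumerate_append, List.foldl_append, ← pvPref]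
    have e1 : PySem.List.enumerate [t] ((0:Int) + ts.length) = [((ts.length : Int), t)] := by
      simp [PySem.List.enumerate]
    rw [e1, List.foldl_cons, List.foldl_nil, ih]
    have hr : (ts ++ [t]).length + 1 = (ts.length + 1) + 1 := by simp
    rw [hr]
    conv_rhs => rw [List.range_succ, List.map_append, List.map_singleton]
    congr 1
    · apply List.map_congr_left
      intro i hi
      rw [List.take_append_of_le_length (by simpa using Nat.lt_succ_iff.mp (List.mem_range.mp hi))]
    · congr 1
      have hfull : (ts ++ [t]).take (ts.length + 1) = ts ++ [t] := by
        rw [show ts.length + 1 = (ts ++ [t]).length by simp, List.take_length]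
      rw [hfull]
      by_cases hts : ts = []
      · subst hts
        simp [pvJoin, PySem.Chars.join_singleton, slice_neg25]
      · have hne0 : ¬ (((ts.length : Int), t).1 == 0) = true := by
          simp only [beq_iff_eq, Nat.cast_eq_zero]
          exact fun h => hts (List.eq_nil_of_length_eq_zero h)
        rw [if_neg hne0]
        have := pyGetD_map_range (ts.length + 1) (fun i => pvL25 (pvJoin (ts.take i))) ts.length (by omega)
        rw [this]
        beta_reduce
        rw [List.take_length, slice_neg25, pvJoin_snoc ts t hts, ← pvL25_append]

lemma pvPref_getD (toks : List (List Char)) (i : Nat) (h : i ≤ toks.length) :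
    (PySem.List.pyGet? (pvPref toks) (i : Int)).getD [] = pvL25 (pvJoin (toks.take i)) := by
  rw [pvPref_spec]
  exact pyGetD_map_range _ _ i (by omega)

def pvSufFold (rs : List (List Char)) : List (List Char) :=
  (PySem.List.enumerate rs).foldl (fun suf jt =>
    suf ++ [if jt.1 == 0 then PySem.List.slice jt.2 none (some 25)
            else PySem.List.slice (jt.2 ++ ' ' :: ((PySem.List.pyGet? suf jt.1).getD [])) none (some 25)]) [[]]

lemma pvSufFold_spec (rs : List (List Char)) :
    pvSufFold rs = (List.range (rs.length + 1)).map (fun j => pvT25 (pvJoin (rs.take j).reverse)) := by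
  induction rs using List.reverseRecOn with
  | nil => simp [pvSufFold, PySem.List.enumerate, pvJoin, pvT25, PySem.Chars.join_nil]
  | append_singleton ts t ih =>
    rw [pvSufFold, PySem.List.enumerate_append, List.foldl_append, ← pvSufFold]
    have e1 : PySem.List.enumerate [t] ((0:Int) + ts.length) = [((ts.length : Int), t)] := by
      simp [PySem.List.enumerate]
    rw [e1, List.foldl_cons, List.foldl_nil, ih]
    have hr : (ts ++ [t]).length + 1 = (ts.length + 1) + 1 := by simp
    rw [hr]
    conv_rhs => rw [List.range_succ, List.map_append, List.map_singleton]
    congr 1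
    · apply List.map_congr_left
      intro i hi
      rw [List.take_append_of_le_length (by simpa using Nat.lt_succ_iff.mp (List.mem_range.mp hi))]
    · congr 1
      have hfull : (ts ++ [t]).take (ts.length + 1) = ts ++ [t] := by
        rw [show ts.length + 1 = (ts ++ [t]).length by simp, List.take_length]
      rw [hfull, List.reverse_append]
      by_cases hts : ts = []
      · subst hts
        simp [pvJoin, PySem.Chars.join_singleton, slice_to25]
      · have hne0 : ¬ (((ts.length : Int), t).1 == 0) = true := by
          simp only [beq_iff_eq, Nat.cast_eq_zero]
          exact fun h => hts (List.eq_nil_of_length_eq_zero h)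
        rw [if_neg hne0]
        have := pyGetD_map_range (ts.length + 1) (fun j => pvT25 (pvJoin (ts.take j).reverse)) ts.length (by omega)
        rw [this]
        beta_reduce
        rw [List.take_length, slice_to25]
        have hrev : ([t] : List (List Char)).reverse ++ ts.reverse = t :: ts.reverse := by simp
        rw [hrev, pvJoin_cons t ts.reverse (by simpa using hts)]
        rw [List.append_cons t ' ' (pvJoin ts.reverse), List.append_cons t ' ' (pvT25 (pvJoin ts.reverse)),
          ← pvT25_append]

def pvSufRev (toks : List (List Char)) : List (List Char) := (pvSufFold toks.reverse).reverse

lemma pvSufRev_getD (toks : List (List Char)) (i : Nat) (h : i ≤ toks.length) :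
    (PySem.List.pyGet? (pvSufRev toks) (i : Int)).getD [] = pvT25 (pvJoin (toks.drop i)) := by
  rw [pvSufRev, pvSufFold_spec, PySem.List.pyGet?_natCast]
  have hlen : ((List.range (toks.reverse.length + 1)).map (fun j => pvT25 (pvJoin (toks.reverse.take j).reverse))).reverse.length = toks.length + 1 := by simp
  rw [List.getElem?_eq_getElem (by omega : i < ((List.range (toks.reverse.length + 1)).map (fun j => pvT25 (pvJoin (toks.reverse.take j).reverse))).reverse.length)]
  rw [Option.getD_some, List.getElem_reverse]
  simp only [List.getElem_map, List.getElem_range, List.length_map, List.length_range, List.length_reverse]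
  rw [show toks.length + 1 - 1 - i = toks.length - i by omega]
  rw [List.take_reverse, List.reverse_reverse]
  rw [show toks.length - (toks.length - i) = i by omega]

lemma pvSuf_eq (toks : List (List Char)) : pvSuf toks = pvSufRev toks := rfl

theorem main_eq (train_sents test_sents : List (List (String × String))) :
    error_list train_sents test_sents = error_list_alt train_sents test_sents := by
  rw [error_list, error_list_alt]
  apply PySem.List.foldl_congr_mem
  intro errors st hst
  apply PySem.List.foldl_congr_mem
  intro acc iw hiw
  obtain ⟨k, hk, hx⟩ := List.mem_iff_getElem.mp hiw
  rw [PySem.List.getElem_enumerate] at hx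
  have hk' : k < st.1.length := by
    have := PySem.List.length_enumerate st.1 0
    omega
  subst hx
  simp only [zero_add]
  by_cases hne : st.1[k].2 ≠ ((PySem.List.pyGet? st.2 (k : Int)).getD ("", "")).2
  · rw [if_pos hne, if_pos hne]
    rw [pvPref_getD (st.1.map pvTok) k (by simpa using le_of_lt hk')]
    rw [show ((k : Int) + 1) = (((k + 1 : Nat)) : Int) by push_cast; ring]
    rw [pvSuf_eq, pvSufRev_getD (st.1.map pvTok) (k + 1) (by simpa using hk')]
    rw [PySem.List.slice_to_natCast, PySem.List.slice_from_natCast]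
    rw [List.map_take, List.map_drop, slice_neg25, slice_to25]
    simp only [pvJoin]
  · rw [if_neg hne, if_neg hne]

-- ===== VERDICT (by name: the statement is the Claim_ definition above) =====
theorem error_list_spec : Claim_equal_error_list := by
  intro train_sents test_sents _ _
  exact main_eq train_sents test_sents
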